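-- pv_equiv track=rewrite | github.com/kthrc/Algorithm-study | 백준/Gold/16120. PPAP/PPAP.py | MakePPAP
-- ===== SOURCE A (Python) =====
-- def MakePPAP(s):
--     stack = []
--
--     for ch in s:
--         stack.append(ch)
--         if len(stack) >= 4 and "".join(stack[-4:]) == "PPAP":
--             del stack[-3:]
--
--     if stack == ["P"]:
--         return "PPAP"
--     else:
--         return "NP"
-- ===== SOURCE B (Python) =====
-- def MakePPAP(s):
--     while True:
--         i = s.find("PPAP")
--         if i == -1:
--             break
--         s = s[:i] + "P" + s[i + 4:]
--     return "PPAP" if s == "P" else "NP"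
-- ===== Notes on version B (the rewrite author's own statement) =====
-- stated objective: simpler
-- what changed: Replaces the character-by-character stack pass with a repeated whole-string rewrite that keeps splicing the leftmost occurrence of the pattern into a single 'P' until none remains, then tests the final string; equivalence rests on confluence of the rewrite (both reach the same normal form).
import Mathlib
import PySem

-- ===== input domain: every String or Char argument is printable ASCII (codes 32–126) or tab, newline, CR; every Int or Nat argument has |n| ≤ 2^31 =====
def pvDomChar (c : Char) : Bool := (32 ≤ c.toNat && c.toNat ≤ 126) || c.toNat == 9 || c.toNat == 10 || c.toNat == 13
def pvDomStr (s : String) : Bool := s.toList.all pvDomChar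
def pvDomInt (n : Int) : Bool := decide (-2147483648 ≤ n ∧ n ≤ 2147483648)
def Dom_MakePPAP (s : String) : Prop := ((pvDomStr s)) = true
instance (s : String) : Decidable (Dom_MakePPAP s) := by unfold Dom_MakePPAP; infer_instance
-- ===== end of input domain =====

-- B replaces A's one-pass stack reduction by repeatedly splicing the leftmost "PPAP" into "P"
-- until none remains (simpler, no stack); proved equal via confluence of the rewrite.

-- ===== PORT A =====
-- one iteration of A's loop body: push ch, then collapse a trailing "PPAP" (del stack[-3:])
def ppapStep (st : List Char) (ch : Char) : List Char :=
  if 4 ≤ (st ++ [ch]).length ∧ PySem.List.slice (st ++ [ch]) (some (-4)) none = ['P','P','A','P']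
  then PySem.List.slice (st ++ [ch]) none (some (-3))
  else st ++ [ch]

def MakePPAP (s : String) : String :=
  let stack := s.toList.foldl ppapStep []
  if stack = ['P'] then "PPAP" else "NP"

-- ===== PORT B =====
-- the while loop of Source B: find the leftmost "PPAP", splice in "P", repeat until absent
-- (when find ≠ -1 the index i is nonnegative, so s[:i] is take and s[i+4:] is drop)
def ppapReduce (l : List Char) : List Char :=
  if _h : PySem.Chars.find l ['P','P','A','P'] = -1 then l
  else
    ppapReduce (l.take (PySem.Chars.find l ['P','P','A','P']).toNat
                ++ 'P' :: l.drop ((PySem.Chars.find l ['P','P','A','P']).toNat + 4))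
termination_by l.length
decreasing_by
  have h0 : (0:Int) ≤ PySem.Chars.find l ['P','P','A','P'] := by
    have := PySem.Chars.neg_one_le_find l ['P','P','A','P']
    omega
  have hpre := (PySem.Chars.find_spec (s := l) (sub := ['P','P','A','P']) h0).1
  have hlen : (PySem.Chars.find l ['P','P','A','P']).toNat + 4 ≤ l.length := by
    have := hpre.length_le
    simp at this
    omega
  simp
  omega

def MakePPAP_alt (s : String) : String :=
  let t := ppapReduce s.toList
  if t = ['P'] then "PPAP" else "NP"

-- ===== PRECONDITION & SPEC =====
def Spec_MakePPAP (s : String) (out : String) : Prop := out = MakePPAP_alt s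
instance (s : String) (out : String) : Decidable (Spec_MakePPAP s out) := by unfold Spec_MakePPAP; infer_instance

-- ===== CLAIM (what is proved, stated in full; the proofs are below) =====
def Claim_equal_MakePPAP : Prop := ∀ (s : String), Dom_MakePPAP s → Spec_MakePPAP s (MakePPAP s)

-- ===== LEMMAS AND PROOFS =====

lemma ppapStep_collapse (u : List Char) :
    ppapStep (u ++ ['P','P','A']) 'P' = u ++ ['P'] := by
  unfold ppapStep
  rw [PySem.List.slice_from_neg_ofNat _ 4 (by omega),
      PySem.List.slice_to_neg_ofNat _ 3 (by omega)]
  rw [show u ++ ['P','P','A'] ++ ['P'] = u ++ ['P','P','A','P'] from by simp]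
  rw [if_pos]
  · rw [show (u ++ ['P','P','A','P']).length - 3 = (u ++ ['P']).length from by simp]
    rw [show u ++ ['P','P','A','P'] = (u ++ ['P']) ++ ['P','A','P'] from by simp]
    exact List.take_left
  · refine ⟨by simp, ?_⟩
    rw [show (u ++ ['P','P','A','P']).length - 4 = u.length from by simp]
    exact List.drop_left

lemma ppapStep_push (st : List Char) (c : Char)
    (h : ¬ (c = 'P' ∧ ['P','P','A'] <:+ st)) : ppapStep st c = st ++ [c] := by
  unfold ppapStep
  rw [PySem.List.slice_from_neg_ofNat _ 4 (by omega)]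
  rw [if_neg]
  rintro ⟨hlen, heq⟩
  have h3 : 3 ≤ st.length := by simp at hlen; omega
  rw [show (st ++ [c]).length - 4 = st.length - 3 from by simp,
      List.drop_append_of_le_length (by omega),
      show (['P','P','A','P'] : List Char) = ['P','P','A'] ++ ['P'] from rfl] at heq
  have hsplit := List.append_inj' heq (by rfl)
  apply h
  refine ⟨by simpa using hsplit.2, st.take (st.length - 3), ?_⟩
  conv_rhs => rw [← List.take_append_drop (st.length - 3) st]
  rw [hsplit.1]

lemma last_suffix_A {v : List Char} {c : Char}
    (h : ['P','P','A'] <:+ v ++ [c]) : c = 'A' := by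
  obtain ⟨t, ht⟩ := h
  have := congrArg List.getLast? ht
  simp [List.getLast?_append] at this
  exact this.symm

lemma ppapStep_four (st : List Char) :
    ppapStep (ppapStep (ppapStep (ppapStep st 'P') 'P') 'A') 'P' = ppapStep st 'P' := by
  by_cases h : ['P','P','A'] <:+ st
  · obtain ⟨u, rfl⟩ := h
    rw [ppapStep_collapse]
    rw [ppapStep_push (u ++ ['P']) 'P'
        (by rintro ⟨-, hs⟩; have := last_suffix_A hs; simp at this)]
    rw [ppapStep_push _ 'A' (by rintro ⟨hc, -⟩; simp at hc)]
    rw [show u ++ ['P'] ++ ['P'] ++ ['A'] = u ++ ['P','P','A'] from by simp]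
    rw [ppapStep_collapse]
  · rw [ppapStep_push st 'P' (by rintro ⟨-, hs⟩; exact h hs)]
    rw [ppapStep_push (st ++ ['P']) 'P'
        (by rintro ⟨-, hs⟩; have := last_suffix_A hs; simp at this)]
    rw [ppapStep_push _ 'A' (by rintro ⟨hc, -⟩; simp at hc)]
    rw [show st ++ ['P'] ++ ['P'] ++ ['A'] = st ++ ['P','P','A'] from by simp]
    rw [ppapStep_collapse]

-- rewriting "PPAP" → "P" anywhere does not change the stack normal form
lemma foldl_rewrite (x y : List Char) (st : List Char) :
    List.foldl ppapStep st (x ++ ['P','P','A','P'] ++ y) =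
    List.foldl ppapStep st (x ++ ['P'] ++ y) := by
  simp only [List.foldl_append, List.foldl_cons, List.foldl_nil]
  rw [ppapStep_four]

-- the stack pass is the identity on PPAP-free input
lemma foldl_fixed (l st : List Char) (h : ¬ ['P','P','A','P'] <:+: (st ++ l)) :
    List.foldl ppapStep st l = st ++ l := by
  induction l generalizing st with
  | nil => simp
  | cons c l ih =>
    have hstep : ppapStep st c = st ++ [c] := by
      apply ppapStep_push
      rintro ⟨rfl, u, rfl⟩
      exact h ⟨u, l, by simp⟩
    rw [List.foldl_cons, hstep, ih (st ++ [c]) (by simpa using h)]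
    simp

lemma ppapReduce_norm (l : List Char) :
    List.foldl ppapStep [] (ppapReduce l) = List.foldl ppapStep [] l := by
  fun_induction ppapReduce l with
  | case1 l heq => rfl
  | case2 l heq ih =>
    rw [ih]
    have h0 : (0:Int) ≤ PySem.Chars.find l ['P','P','A','P'] := by
      have := PySem.Chars.neg_one_le_find l ['P','P','A','P']
      omega
    have hpre := (PySem.Chars.find_spec (s := l) (sub := ['P','P','A','P']) h0).1
    obtain ⟨r, hr⟩ := hpre
    have hl : l = l.take (PySem.Chars.find l ['P','P','A','P']).toNat
                  ++ ['P','P','A','P'] ++ r := by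
      conv_lhs => rw [← List.take_append_drop (PySem.Chars.find l ['P','P','A','P']).toNat l]
      rw [← hr, List.append_assoc]
    have hr' : l.drop ((PySem.Chars.find l ['P','P','A','P']).toNat + 4) = r := by
      have h4 := congrArg (List.drop 4) hr
      simp [List.drop_drop] at h4
      exact h4.symm
    rw [hr']
    calc List.foldl ppapStep []
            (l.take (PySem.Chars.find l ['P','P','A','P']).toNat ++ 'P' :: r)
        = List.foldl ppapStep []
            (l.take (PySem.Chars.find l ['P','P','A','P']).toNat ++ ['P'] ++ r) := by simp
      _ = List.foldl ppapStep []
            (l.take (PySem.Chars.find l ['P','P','A','P']).toNat ++ ['P','P','A','P'] ++ r) :=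
          (foldl_rewrite _ _ _).symm
      _ = List.foldl ppapStep [] l := by rw [← hl]

lemma ppapReduce_free (l : List Char) :
    PySem.Chars.find (ppapReduce l) ['P','P','A','P'] = -1 := by
  fun_induction ppapReduce l with
  | case1 l heq => exact heq
  | case2 l heq ih => exact ih

lemma ppapReduce_eq_foldl (l : List Char) :
    ppapReduce l = List.foldl ppapStep [] l := by
  have hfree : ¬ ['P','P','A','P'] <:+: ([] ++ ppapReduce l) := by
    simp only [List.nil_append]
    rw [← PySem.Chars.find_eq_neg_one_iff]
    exact ppapReduce_free l
  have hfix := foldl_fixed (ppapReduce l) [] hfree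
  rw [← ppapReduce_norm l, hfix]
  simp

-- ===== VERDICT (by name: the statement is the Claim_ definition above) =====
theorem MakePPAP_spec : Claim_equal_MakePPAP := by
  intro s _
  unfold Spec_MakePPAP MakePPAP MakePPAP_alt
  rw [ppapReduce_eq_foldl]
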